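-- pv_equiv track=rewrite | github.com/lexvicacom/tinyblok | tools/gen.py | _filter_to_fn_name
-- ===== SOURCE A (Python) =====
-- def _filter_to_fn_name(filt: str) -> str:
--     prefix = "tinyblok."
--     tail = filt[len(prefix) :] if filt.startswith(prefix) else filt
--     out = ["on"]
--     upcase = True
--     for c in tail:
--         if c in ".-":
--             out.append("_")
--             upcase = False
--         elif upcase:
--             out.append(c.upper())
--             upcase = False
--         else:
--             out.append(c)
--     return "".join(out)
-- ===== SOURCE B (Python) =====
-- def _filter_to_fn_name(filt: str) -> str:
--     prefix = "tinyblok."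
--     tail = filt[len(prefix):] if filt.startswith(prefix) else filt
--     body = tail.replace(".", "_").replace("-", "_")
--     if tail and tail[0] not in ".-":
--         body = body[0].upper() + body[1:]
--     return "on" + body
-- ===== Notes on version B (the rewrite author's own statement) =====
-- stated objective: idiomatic
-- what changed: Replaced the per-character loop with its upcase state flag by whole-string str.replace passes for the separators plus one conditional capitalization of the first character.
import Mathlib
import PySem

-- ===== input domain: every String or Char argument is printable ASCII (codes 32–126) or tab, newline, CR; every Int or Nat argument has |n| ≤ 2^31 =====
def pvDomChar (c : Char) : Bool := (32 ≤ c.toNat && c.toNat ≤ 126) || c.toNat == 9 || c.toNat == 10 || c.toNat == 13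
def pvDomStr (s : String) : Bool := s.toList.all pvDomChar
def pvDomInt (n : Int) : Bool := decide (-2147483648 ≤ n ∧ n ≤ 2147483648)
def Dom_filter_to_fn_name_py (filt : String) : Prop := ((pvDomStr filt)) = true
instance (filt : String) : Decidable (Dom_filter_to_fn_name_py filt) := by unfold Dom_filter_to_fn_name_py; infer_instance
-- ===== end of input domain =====

-- B replaces A's per-character loop with its upcase state flag by whole-string replace passes
-- plus one conditional capitalize of the first character (objective: idiomatic).


-- ===== PORT A =====
-- loop body of A: out/upcase state, branches in A's order
def pvStepA (st : List String × Bool) (c : Char) : List String × Bool :=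
  if c = '.' ∨ c = '-' then (st.1 ++ ["_"], false)
  else if st.2 then (st.1 ++ [String.ofList [PySem.Chars.upperChar c]], false)
  else (st.1 ++ [String.ofList [c]], false)

def filter_to_fn_name_py (filt : String) : String :=
  let pfx := "tinyblok."
  let tail := if PySem.Str.startswith filt pfx then PySem.Str.slice filt (some (PySem.Str.len pfx)) none else filt
  let st := tail.toList.foldl pvStepA (["on"], true)
  PySem.Str.join "" st.1

-- ===== PORT B =====
def filter_to_fn_name_py_alt (filt : String) : String :=
  let pfx := "tinyblok."
  let tail := if PySem.Str.startswith filt pfx then PySem.Str.slice filt (some (PySem.Str.len pfx)) none else filt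
  let body := PySem.Str.replace (PySem.Str.replace tail "." "_") "-" "_"
  let body := if tail ≠ "" ∧ ¬ (PySem.Str.pyGet? tail 0 = some '.' ∨ PySem.Str.pyGet? tail 0 = some '-')
    then match body.toList with          -- body[0].upper() + body[1:]; body ≠ "" here since tail ≠ ""
      | [] => body
      | c :: rest => String.ofList (PySem.Chars.upperChar c :: rest)
    else body
  "on" ++ body

-- ===== PRECONDITION & SPEC =====
def Spec_filter_to_fn_name_py (filt : String) (out : String) : Prop := out = filter_to_fn_name_py_alt filt
instance (filt : String) (out : String) : Decidable (Spec_filter_to_fn_name_py filt out) := by unfold Spec_filter_to_fn_name_py; infer_instance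

-- ===== CLAIM (what is proved, stated in full; the proofs are below) =====
def Claim_equal_filter_to_fn_name_py : Prop := ∀ (filt : String), Dom_filter_to_fn_name_py filt → Spec_filter_to_fn_name_py filt (filter_to_fn_name_py filt)

-- ===== LEMMAS AND PROOFS =====

-- the separator-to-underscore substitution, string- and char-valued
def pvFStr (c : Char) : String := if c = '.' ∨ c = '-' then "_" else String.ofList [c]
def pvG (c : Char) : Char := if c = '.' ∨ c = '-' then '_' else c

-- A's loop once upcase is false just maps pvFStr
theorem pv_foldl_false (cs : List Char) (acc : List String) :
    (cs.foldl pvStepA (acc, false)).1 = acc ++ cs.map pvFStr := by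
  induction cs generalizing acc with
  | nil => simp
  | cons c t ih =>
      rw [List.foldl_cons]
      by_cases h : c = '.' ∨ c = '-'
      · rw [show pvStepA (acc, false) c = (acc ++ ["_"], false) from by simp [pvStepA, h], ih]
        simp [pvFStr, h]
      · rw [show pvStepA (acc, false) c = (acc ++ [String.ofList [c]], false) from by
          simp [pvStepA, h], ih]
        simp [pvFStr, h]

-- "".join is flatten
theorem pv_join_nil (parts : List (List Char)) :
    PySem.Chars.join [] parts = parts.flatten := by
  simp only [PySem.Chars.join, List.intercalate]
  induction parts with
  | nil => rfl
  | cons p t ih =>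
      cases t with
      | nil => rfl
      | cons q u =>
          simp only [List.intersperse, List.flatten_cons] at ih ⊢
          simp [ih]

theorem pv_flatten_fstr (cs : List Char) :
    (List.map String.toList (cs.map pvFStr)).flatten = cs.map pvG := by
  induction cs with
  | nil => rfl
  | cons c t ih =>
      simp only [List.map_cons, List.flatten_cons, ih, pvFStr, pvG]
      split_ifs with h <;> simp

-- single-character str.replace is a character map
theorem pv_replace_go_single (o n : Char) (fuel : Nat) (cs : List Char) (acc : List Char)
    (h : cs.length ≤ fuel) :
    PySem.Chars.replace.go [o] [n] fuel cs acc
      = acc.reverse ++ cs.map (fun c => if c = o then n else c) := by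
  induction fuel generalizing cs acc with
  | zero =>
      have : cs = [] := List.length_eq_zero_iff.mp (Nat.le_zero.mp h)
      subst this; simp [PySem.Chars.replace.go]
  | succ f ih =>
      cases cs with
      | nil => simp [PySem.Chars.replace.go]
      | cons c t =>
          rw [List.length_cons] at h
          by_cases hco : c = o
          · subst hco
            simp only [PySem.Chars.replace.go]
            rw [if_pos (by simp [List.isPrefixOf])]
            simp only [List.length_cons, List.length_nil, List.drop_succ_cons, List.drop_zero]
            rw [ih t _ (by omega)]
            simp
          · simp only [PySem.Chars.replace.go]
            rw [if_neg (by simp [List.isPrefixOf]; exact fun hh => hco hh.symm)]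
            rw [ih t _ (by omega)]
            simp [hco]

theorem pv_replace_single (o n : Char) (cs : List Char) :
    PySem.Chars.replace cs [o] [n] = cs.map (fun c => if c = o then n else c) := by
  have hne : ([o] : List Char).isEmpty = false := rfl
  simp only [PySem.Chars.replace, hne, Bool.false_eq_true, if_false]
  simpa using pv_replace_go_single o n cs.length cs [] (le_refl _)

theorem pv_double_replace (cs : List Char) :
    PySem.Chars.replace (PySem.Chars.replace cs ['.'] ['_']) ['-'] ['_'] = cs.map pvG := by
  rw [pv_replace_single, pv_replace_single, List.map_map]
  apply List.map_congr_left
  intro c _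
  simp only [Function.comp, pvG]
  by_cases h1 : c = '.' <;> by_cases h2 : c = '-' <;> simp [h1, h2]

theorem pv_join_two (x : String) (rest : List Char) :
    (PySem.Str.join "" (["on", x] ++ rest.map pvFStr)).toList
      = 'o' :: 'n' :: (x.toList ++ rest.map pvG) := by
  rw [PySem.Str.toList_join, show ("" : String).toList = [] from rfl, pv_join_nil,
      List.map_append, List.flatten_append, pv_flatten_fstr]
  simp [show ("on" : String).toList = ['o', 'n'] from rfl]

-- the two transformations agree for an arbitrary tail string
theorem pv_core (tail : String) :
    PySem.Str.join "" ((tail.toList.foldl pvStepA (["on"], true))).1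
      = "on" ++ (if tail ≠ "" ∧ ¬ (PySem.Str.pyGet? tail 0 = some '.' ∨ PySem.Str.pyGet? tail 0 = some '-')
          then match (PySem.Str.replace (PySem.Str.replace tail "." "_") "-" "_").toList with
            | [] => PySem.Str.replace (PySem.Str.replace tail "." "_") "-" "_"
            | c :: rest => String.ofList (PySem.Chars.upperChar c :: rest)
          else PySem.Str.replace (PySem.Str.replace tail "." "_") "-" "_") := by
  have hbody : (PySem.Str.replace (PySem.Str.replace tail "." "_") "-" "_").toList
      = tail.toList.map pvG := by
    simp only [PySem.Str.toList_replace]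
    rw [show ("." : String).toList = ['.'] from rfl, show ("-" : String).toList = ['-'] from rfl,
        show ("_" : String).toList = ['_'] from rfl, pv_double_replace]
  apply String.toList_inj.mp
  cases hcs : tail.toList with
  | nil =>
      have hte : tail = "" := String.toList_inj.mp (by simp [hcs])
      subst hte
      simp [PySem.Str.toList_join, hbody]
  | cons c rest =>
      have htne : tail ≠ "" := by
        intro h; rw [h] at hcs; simp at hcs
      have hget : PySem.Str.pyGet? tail 0 = some c := by
        simp [PySem.Str.pyGet?_eq, hcs]
      rw [List.foldl_cons]
      by_cases hsep : c = '.' ∨ c = '-'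
      · -- leading separator: neither side capitalizes
        have hgc : pvG c = '_' := by simp [pvG, hsep]
        rw [show pvStepA (["on"], true) c = (["on", "_"], false) from by simp [pvStepA, hsep]]
        have hcond : ¬ (tail ≠ "" ∧ ¬ (PySem.Str.pyGet? tail 0 = some '.' ∨ PySem.Str.pyGet? tail 0 = some '-')) :=
          fun h => h.2 (by rcases hsep with h | h
                           · exact Or.inl (h ▸ hget)
                           · exact Or.inr (h ▸ hget))
        rw [if_neg hcond, pv_foldl_false, pv_join_two, String.toList_append, hbody, hcs]
        simp [hgc]
      · -- leading letter: both sides upcase it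
        have hgc : pvG c = c := by simp [pvG, hsep]
        rw [show pvStepA (["on"], true) c = (["on", String.ofList [PySem.Chars.upperChar c]], false) from by
          simp [pvStepA, hsep]]
        have hcond : tail ≠ "" ∧ ¬ (PySem.Str.pyGet? tail 0 = some '.' ∨ PySem.Str.pyGet? tail 0 = some '-') := by
          refine ⟨htne, ?_⟩
          rw [hget]
          rw [not_or] at hsep
          simp only [Option.some_inj, not_or]
          exact ⟨hsep.1, hsep.2⟩
        rw [if_pos hcond, pv_foldl_false, pv_join_two]
        conv_rhs => rw [hbody, hcs]
        simp [hgc]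

-- ===== VERDICT (by name: the statement is the Claim_ definition above) =====
theorem filter_to_fn_name_py_spec : Claim_equal_filter_to_fn_name_py := by
  intro filt _
  unfold Spec_filter_to_fn_name_py
  exact pv_core _
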